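-- pv_equiv track=rewrite | github.com/irBags/notaol | notaol/fdo/serialize.py | unserialize_stream_id
-- ===== SOURCE A (Python) =====
-- def unserialize_stream_id(data):
--     # FIXME: this is bogus!
--     stream_id = 0
--     length = 0
--     for index, byte_value in zip(range(len(data)), data):
--         stream_id <<= 8
--         stream_id |= byte_value
--         length = index + 1
--         if byte_value >= 0x10:
--             break
--
--     return (stream_id, data[:length])
-- ===== SOURCE B (Python) =====
-- def unserialize_stream_id(data):
--     # First find the cutoff: prefix ends at the first byte >= 0x10 (or end of data).
--     length = next((i + 1 for i, b in enumerate(data) if b >= 0x10), len(data))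
--     prefix = data[:length]
--     # Then accumulate the stream id over that prefix in a second pass.
--     stream_id = 0
--     for b in prefix:
--         stream_id = (stream_id << 8) | b
--     return (stream_id, prefix)
-- ===== Notes on version B (the rewrite author's own statement) =====
-- stated objective: idiomatic
-- what changed: B separates boundary-finding (a generator scan for the first byte >= 0x10) from value construction (a plain fold over the slice), instead of A's single fused loop with an early break that also tracks length.
import Mathlib
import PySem

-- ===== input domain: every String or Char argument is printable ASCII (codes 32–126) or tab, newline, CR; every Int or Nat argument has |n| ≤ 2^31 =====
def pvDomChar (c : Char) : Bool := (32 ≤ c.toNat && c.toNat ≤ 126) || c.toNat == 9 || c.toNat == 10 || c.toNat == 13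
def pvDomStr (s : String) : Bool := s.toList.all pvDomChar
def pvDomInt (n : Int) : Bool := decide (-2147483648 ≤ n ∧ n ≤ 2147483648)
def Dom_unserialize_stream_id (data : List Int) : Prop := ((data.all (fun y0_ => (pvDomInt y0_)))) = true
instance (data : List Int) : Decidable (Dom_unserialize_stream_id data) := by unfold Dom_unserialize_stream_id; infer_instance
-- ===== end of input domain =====

-- B separates boundary-finding from value construction (idiomatic decomposition); A fuses both in one loop with a break.

-- ===== PORT A =====
-- A's fused loop: shifts/ors each byte, records length = index + 1, breaks on byte >= 0x10.
def unserialize_stream_id_loop (xs : List Int) (stream_id length index : Int) : Int × Int :=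
  match xs with
  | [] => (stream_id, length)
  | byte_value :: rest =>
    let stream_id := Int.lor (stream_id <<< 8) byte_value
    let length := index + 1
    if byte_value ≥ 0x10 then (stream_id, length)
    else unserialize_stream_id_loop rest stream_id length (index + 1)

def unserialize_stream_id (data : List Int) : Int × List Int :=
  let r := unserialize_stream_id_loop data 0 0 0
  (r.1, PySem.List.slice data none (some r.2))

-- ===== PORT B =====
def unserialize_stream_id_alt (data : List Int) : Int × List Int :=
  let length : Nat :=
    match data.findIdx? (fun b => b ≥ 0x10) with
    | some i => i + 1
    | none => data.length
  let pre := data.take length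
  (pre.foldl (fun acc b => Int.lor (acc <<< 8) b) 0, pre)

-- ===== PRECONDITION & SPEC =====
def Spec_unserialize_stream_id (data : List Int) (out : Int × List Int) : Prop := out = unserialize_stream_id_alt data
instance (data : List Int) (out : Int × List Int) : Decidable (Spec_unserialize_stream_id data out) := by unfold Spec_unserialize_stream_id; infer_instance

-- ===== CLAIM (what is proved, stated in full; the proofs are below) =====
def Claim_equal_unserialize_stream_id : Prop := ∀ (data : List Int), Dom_unserialize_stream_id data → Spec_unserialize_stream_id data (unserialize_stream_id data)

-- ===== LEMMAS AND PROOFS =====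
def pvCut (xs : List Int) : Nat :=
  match xs.findIdx? (fun b => b ≥ 0x10) with
  | some i => i + 1
  | none => xs.length

theorem unserialize_stream_id_loop_eq (xs : List Int) :
    ∀ (sid idx : Int),
      unserialize_stream_id_loop xs sid idx idx =
        ((xs.take (pvCut xs)).foldl (fun acc b => Int.lor (acc <<< 8) b) sid,
         idx + (pvCut xs : Int)) := by
  induction xs with
  | nil => intro sid idx; simp [unserialize_stream_id_loop, pvCut]
  | cons b rest ih =>
    intro sid idx
    by_cases hb : b ≥ 0x10
    · simp [unserialize_stream_id_loop, pvCut, List.findIdx?_cons, hb]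
    · have : unserialize_stream_id_loop (b :: rest) sid idx idx =
          unserialize_stream_id_loop rest (Int.lor (sid <<< 8) b) (idx + 1) (idx + 1) := by
        simp [unserialize_stream_id_loop, hb]
      rw [this, ih]
      simp [pvCut, List.findIdx?_cons, hb]
      cases h : rest.findIdx? (fun b => b ≥ 0x10) with
      | none => simp; omega
      | some i => simp; omega

-- ===== VERDICT (by name: the statement is the Claim_ definition above) =====
theorem unserialize_stream_id_spec : Claim_equal_unserialize_stream_id := by
  intro data _
  unfold Spec_unserialize_stream_id unserialize_stream_id unserialize_stream_id_alt
  rw [unserialize_stream_id_loop_eq data 0 0]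
  simp only [zero_add]
  rw [PySem.List.slice_to_natCast]
  rfl
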